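-- pv_equiv track=rewrite | github.com/wso2-incubator/BACE | experiments/scripts/coevolution/analyse/show_progress.py | group_events_into_cycles
-- ===== SOURCE A (Python) =====
-- from typing import Any
--
-- def group_events_into_cycles(events: list[dict[str, Any]]) -> list[list[dict[str, Any]]]:
--     """Group events into cycles delimited by GENERATION_SUMMARY."""
--     cycles = []
--     current_cycle = []
--     for e in events:
--         current_cycle.append(e)
--         if e["event_type"] == "GENERATION_SUMMARY":
--             cycles.append(current_cycle)
--             current_cycle = []
--     if current_cycle:
--         cycles.append(current_cycle)
--     return cycles
-- ===== SOURCE B (Python) =====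
-- from typing import Any
--
-- def group_events_into_cycles(events: list[dict[str, Any]]) -> list[list[dict[str, Any]]]:
--     """Group events into cycles delimited by GENERATION_SUMMARY.
--
--     Splitting decomposition: repeatedly find the first delimiter in the
--     remaining suffix and slice a cycle off the front, instead of
--     accumulating events one at a time.
--     """
--     cycles = []
--     rest = events
--     while rest:
--         i = next((k for k, e in enumerate(rest)
--                   if e["event_type"] == "GENERATION_SUMMARY"), None)
--         if i is None:
--             cycles.append(rest)
--             break
--         cycles.append(rest[:i + 1])
--         rest = rest[i + 1:]
--     return cycles
-- ===== Notes on version B (the rewrite author's own statement) =====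
-- stated objective: alternative
-- what changed: Replaced the element-by-element accumulator loop with a splitting loop that finds the first GENERATION_SUMMARY delimiter in the remaining suffix and slices a whole cycle off at once.
import Mathlib
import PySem

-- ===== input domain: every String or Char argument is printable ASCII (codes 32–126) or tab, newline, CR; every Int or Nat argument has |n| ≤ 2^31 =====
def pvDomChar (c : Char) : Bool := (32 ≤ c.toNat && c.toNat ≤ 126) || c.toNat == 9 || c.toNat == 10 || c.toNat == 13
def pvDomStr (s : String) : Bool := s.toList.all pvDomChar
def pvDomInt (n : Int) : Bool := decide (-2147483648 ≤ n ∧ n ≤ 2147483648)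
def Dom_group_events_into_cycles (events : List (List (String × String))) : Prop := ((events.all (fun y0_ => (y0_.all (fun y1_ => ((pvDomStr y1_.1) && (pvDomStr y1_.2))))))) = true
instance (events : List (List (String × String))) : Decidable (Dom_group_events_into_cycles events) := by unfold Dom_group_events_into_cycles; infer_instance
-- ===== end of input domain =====

-- B splits cycles off the front by locating the first delimiter, instead of A's element-by-element accumulator loop; same cost, alternative decomposition.

-- ===== PORT A =====
-- e["event_type"] == "GENERATION_SUMMARY": dict lookup (first match in the assoc list);
-- Pre_ guarantees the key is present, so comparing the Option is exact there.
def pvIsSummary (e : List (String × String)) : Bool :=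
  List.lookup "event_type" e == some "GENERATION_SUMMARY"

def group_events_into_cycles (events : List (List (String × String))) : List (List (List (String × String))) :=
  let st := events.foldl
    (fun (st : List (List (List (String × String))) × List (List (String × String))) e =>
      let cur := st.2 ++ [e]
      if pvIsSummary e then (st.1 ++ [cur], []) else (st.1, cur))
    ([], [])
  if st.2 = [] then st.1 else st.1 ++ [st.2]

-- ===== PORT B =====
-- while rest: find first delimiter index; slice a cycle off the front (rest[:i+1]) and continue on rest[i+1:]
def group_events_into_cycles_alt : List (List (String × String)) → List (List (List (String × String)))
  | [] => []
  | e :: rest =>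
    match (e :: rest).findIdx? pvIsSummary with
    | none => [e :: rest]
    | some i => (e :: rest).take (i + 1) :: group_events_into_cycles_alt ((e :: rest).drop (i + 1))
termination_by events => events.length
decreasing_by
  simp

-- ===== PRECONDITION & SPEC =====
-- Pre_: every event dict carries the key "event_type" (Python A raises KeyError otherwise)
def Pre_group_events_into_cycles (events : List (List (String × String))) : Prop :=
  (events.all (fun e => (List.lookup "event_type" e).isSome)) = true
instance (events : List (List (String × String))) : Decidable (Pre_group_events_into_cycles events) := by unfold Pre_group_events_into_cycles; infer_instance
def pvWitness_group_events_into_cycles : (List (List (String × String))) :=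
  [[("event_type", "GENERATION_SUMMARY")], [("event_type", "MUTATION")]]

def Spec_group_events_into_cycles (events : List (List (String × String))) (out : List (List (List (String × String)))) : Prop := out = group_events_into_cycles_alt events
instance (events : List (List (String × String))) (out : List (List (List (String × String)))) : Decidable (Spec_group_events_into_cycles events out) := by unfold Spec_group_events_into_cycles; infer_instance

-- ===== CLAIM (what is proved, stated in full; the proofs are below) =====
def Claim_equal_group_events_into_cycles : Prop := ∀ (events : List (List (String × String))), Dom_group_events_into_cycles events → Pre_group_events_into_cycles events → Spec_group_events_into_cycles events (group_events_into_cycles events)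

-- ===== LEMMAS AND PROOFS =====

-- reference recursion both ports are reduced to
def pvSpecGroups : List (List (String × String)) → List (List (List (String × String)))
  | [] => []
  | e :: rest =>
    if pvIsSummary e then [e] :: pvSpecGroups rest
    else
      match pvSpecGroups rest with
      | [] => [[e]]
      | g :: gs => (e :: g) :: gs

def pvConsPrefix (cur : List (List (String × String))) :
    List (List (List (String × String))) → List (List (List (String × String)))
  | [] => if cur = [] then [] else [cur]
  | g :: gs => (cur ++ g) :: gs

theorem pvFoldA (events : List (List (String × String)))
    (c : List (List (List (String × String)))) (cur : List (List (String × String))) :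
    (let st := events.foldl
      (fun (st : List (List (List (String × String))) × List (List (String × String))) e =>
        let cur := st.2 ++ [e]
        if pvIsSummary e then (st.1 ++ [cur], []) else (st.1, cur)) (c, cur)
     if st.2 = [] then st.1 else st.1 ++ [st.2])
    = c ++ pvConsPrefix cur (pvSpecGroups events) := by
  induction events generalizing c cur with
  | nil =>
    simp only [List.foldl_nil, pvSpecGroups, pvConsPrefix]
    split <;> simp_all
  | cons e rest ih =>
    simp only [List.foldl_cons, pvSpecGroups]
    by_cases hp : pvIsSummary e
    · simp only [hp, if_true]
      rw [ih]
      cases hs : pvSpecGroups rest <;>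
        simp [pvConsPrefix, List.append_assoc]
    · simp only [hp, if_false, Bool.false_eq_true]
      rw [ih]
      cases hs : pvSpecGroups rest with
      | nil => simp [pvConsPrefix]
      | cons g gs => simp [pvConsPrefix, List.append_assoc]

theorem pvA_eq_spec (events : List (List (String × String))) :
    group_events_into_cycles events = pvSpecGroups events := by
  unfold group_events_into_cycles
  rw [pvFoldA]
  cases hs : pvSpecGroups events <;> simp [pvConsPrefix]

theorem pvSpec_of_none (l : List (List (String × String)))
    (h : l.findIdx? pvIsSummary = none) :
    pvSpecGroups l = if l = [] then [] else [l] := by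
  induction l with
  | nil => simp [pvSpecGroups]
  | cons x xs ihx =>
    rw [List.findIdx?_cons] at h
    by_cases hx : pvIsSummary x
    · simp [hx] at h
    · simp only [hx, Bool.false_eq_true, if_false] at h
      have hxs : xs.findIdx? pvIsSummary = none := by
        cases h2 : xs.findIdx? pvIsSummary with
        | none => rfl
        | some k => simp [h2] at h
      simp only [pvSpecGroups, hx, Bool.false_eq_true, if_false]
      rw [ihx hxs]
      cases xs <;> simp

theorem pvSpec_split (l : List (List (String × String))) (i : Nat)
    (h : l.findIdx? pvIsSummary = some i) :
    pvSpecGroups l = l.take (i + 1) :: pvSpecGroups (l.drop (i + 1)) := by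
  induction l generalizing i with
  | nil => simp at h
  | cons e rest ih =>
    rw [List.findIdx?_cons] at h
    by_cases hp : pvIsSummary e
    · simp only [hp, if_true] at h
      obtain rfl : i = 0 := by simpa using h.symm
      simp [pvSpecGroups, hp]
    · simp only [hp, Bool.false_eq_true, if_false] at h
      cases hr : rest.findIdx? pvIsSummary with
      | none => simp [hr] at h
      | some j =>
        rw [hr] at h
        obtain rfl : i = j + 1 := by simpa using h.symm
        simp only [pvSpecGroups, hp, Bool.false_eq_true, if_false]
        rw [ih j hr]
        simp

theorem pvB_eq_spec_aux (n : Nat) : ∀ (events : List (List (String × String))),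
    events.length ≤ n → group_events_into_cycles_alt events = pvSpecGroups events := by
  induction n with
  | zero =>
    intro events h
    have : events = [] := by cases events <;> simp_all
    subst this
    rw [group_events_into_cycles_alt.eq_def]
    rfl
  | succ n ih =>
    intro events h
    cases events with
    | nil =>
      rw [group_events_into_cycles_alt.eq_def]
      rfl
    | cons e rest =>
      cases hf : (e :: rest).findIdx? pvIsSummary with
      | none =>
        rw [group_events_into_cycles_alt.eq_def]
        simp only [hf]
        rw [pvSpec_of_none _ hf]
        simp
      | some i =>
        rw [group_events_into_cycles_alt.eq_def]
        simp only [hf]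
        rw [pvSpec_split _ i hf]
        have hlen : ((e :: rest).drop (i + 1)).length ≤ n := by
          simp only [List.length_drop] at *
          simp at h ⊢
          omega
        rw [ih _ hlen]

theorem pvB_eq_spec (events : List (List (String × String))) :
    group_events_into_cycles_alt events = pvSpecGroups events :=
  pvB_eq_spec_aux events.length events le_rfl

-- ===== VERDICT (by name: the statement is the Claim_ definition above) =====
theorem group_events_into_cycles_spec : Claim_equal_group_events_into_cycles := by
  intro events _ _
  unfold Spec_group_events_into_cycles
  rw [pvA_eq_spec, pvB_eq_spec]
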